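-- pv_equiv track=rewrite | github.com/buzusima/ai-forex-trading-system | heart/risk_manager.py | _are_correlated_pairs
-- ===== SOURCE A (Python) =====
-- def _are_correlated_pairs(symbol1: str, symbol2: str) -> bool:
--     """Check if two currency pairs are correlated"""
--     # Simplified correlation mapping
--     correlation_groups = [
--         ["EURUSD", "GBPUSD", "AUDUSD"],  # Risk-on currencies
--         ["USDJPY", "USDCHF"],           # USD strength pairs
--         ["EURJPY", "GBPJPY", "AUDJPY"], # JPY crosses
--     ]
--
--     for group in correlation_groups:
--         if symbol1 in group and symbol2 in group:
--             return True
--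
--     return False
-- ===== SOURCE B (Python) =====
-- def _are_correlated_pairs(symbol1: str, symbol2: str) -> bool:
--     """Check if two currency pairs are correlated"""
--     correlation_groups = [
--         ["EURUSD", "GBPUSD", "AUDUSD"],
--         ["USDJPY", "USDCHF"],
--         ["EURJPY", "GBPJPY", "AUDJPY"],
--     ]
--     index = {}
--     for gid, group in enumerate(correlation_groups):
--         for sym in group:
--             index[sym] = gid
--     g1 = index.get(symbol1)
--     g2 = index.get(symbol2)
--     return g1 is not None and g1 == g2
-- ===== Notes on version B (the rewrite author's own statement) =====
-- stated objective: idiomatic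
-- what changed: Replaces the scan over groups testing dual membership by building a symbol-to-group-index dict once and comparing the two lookups (with a presence guard so two unknown symbols do not compare equal).
import Mathlib
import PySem

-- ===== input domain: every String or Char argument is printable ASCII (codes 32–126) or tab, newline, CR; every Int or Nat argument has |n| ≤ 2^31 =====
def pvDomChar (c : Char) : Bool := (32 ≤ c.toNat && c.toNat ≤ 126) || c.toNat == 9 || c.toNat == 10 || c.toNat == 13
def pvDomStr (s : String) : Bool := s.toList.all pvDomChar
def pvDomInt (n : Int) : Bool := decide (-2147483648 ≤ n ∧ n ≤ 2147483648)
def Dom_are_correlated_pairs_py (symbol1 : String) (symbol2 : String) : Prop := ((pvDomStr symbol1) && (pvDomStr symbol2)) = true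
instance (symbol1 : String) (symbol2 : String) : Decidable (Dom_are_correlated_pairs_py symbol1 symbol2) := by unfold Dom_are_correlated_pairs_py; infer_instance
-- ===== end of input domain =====

-- B replaces A's scan over the groups (testing dual membership per group) by a
-- symbol→group-index dict built once, with a presence-guarded compare of the two
-- lookups (idiomatic; same behaviour, no speed claim).

-- ===== PORT A =====
-- the constant correlation_groups literal of A (and of B)
def pvGroups : List (List String) :=
  [["EURUSD", "GBPUSD", "AUDUSD"],
   ["USDJPY", "USDCHF"],
   ["EURJPY", "GBPJPY", "AUDJPY"]]

-- the 'for group in correlation_groups: if symbol1 in group and symbol2 in group: return True' loop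
def pvScanGroups : List (List String) → String → String → Bool
  | [], _, _ => false
  | g :: rest, s1, s2 =>
      if g.contains s1 && g.contains s2 then true
      else pvScanGroups rest s1 s2

def are_correlated_pairs_py (symbol1 : String) (symbol2 : String) : Bool :=
  pvScanGroups pvGroups symbol1 symbol2

-- ===== PORT B =====
-- index = {}; for gid, group in enumerate(groups): for sym in group: index[sym] = gid
def pvIndex : PySem.Dict String Int :=
  (PySem.List.enumerate pvGroups).foldl
    (fun d p => p.2.foldl (fun d sym => d.insert sym p.1) d)
    PySem.Dict.empty

def are_correlated_pairs_py_alt (symbol1 : String) (symbol2 : String) : Bool :=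
  match pvIndex.get? symbol1, pvIndex.get? symbol2 with
  | some g1, some g2 => g1 == g2      -- g1 is not None and g1 == g2
  | _, _ => false

-- ===== PRECONDITION & SPEC =====
def Spec_are_correlated_pairs_py (symbol1 : String) (symbol2 : String) (out : Bool) : Prop := out = are_correlated_pairs_py_alt symbol1 symbol2
instance (symbol1 : String) (symbol2 : String) (out : Bool) : Decidable (Spec_are_correlated_pairs_py symbol1 symbol2 out) := by unfold Spec_are_correlated_pairs_py; infer_instance

-- ===== CLAIM (what is proved, stated in full; the proofs are below) =====
def Claim_equal_are_correlated_pairs_py : Prop := ∀ (symbol1 : String) (symbol2 : String), Dom_are_correlated_pairs_py symbol1 symbol2 → Spec_are_correlated_pairs_py symbol1 symbol2 (are_correlated_pairs_py symbol1 symbol2)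

-- ===== LEMMAS AND PROOFS =====

-- classification of a string against the eight symbols (0–7 = the symbol's rank, 8 = none)
def pvCls (s : String) : Fin 9 :=
  if s = "EURUSD" then 0 else if s = "GBPUSD" then 1 else if s = "AUDUSD" then 2
  else if s = "USDJPY" then 3 else if s = "USDCHF" then 4
  else if s = "EURJPY" then 5 else if s = "GBPJPY" then 6 else if s = "AUDJPY" then 7
  else 8

-- the group id a classification maps to in B's index
def pvGid (x : Fin 9) : Option Int :=
  if x.val < 3 then some 0 else if x.val < 5 then some 1 else if x.val < 8 then some 2 else none

theorem pvIndex_eq :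
    pvIndex = PySem.Dict.mk
      [("EURUSD", 0), ("GBPUSD", 0), ("AUDUSD", 0),
       ("USDJPY", 1), ("USDCHF", 1),
       ("EURJPY", 2), ("GBPJPY", 2), ("AUDJPY", 2)] := by decide

theorem pvContains0 (s : String) :
    (["EURUSD", "GBPUSD", "AUDUSD"] : List String).contains s
      = decide ((pvCls s).val < 3) := by
  by_cases h1 : s = "EURUSD"; · subst h1; decide
  by_cases h2 : s = "GBPUSD"; · subst h2; decide
  by_cases h3 : s = "AUDUSD"; · subst h3; decide
  by_cases h4 : s = "USDJPY"; · subst h4; decide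
  by_cases h5 : s = "USDCHF"; · subst h5; decide
  by_cases h6 : s = "EURJPY"; · subst h6; decide
  by_cases h7 : s = "GBPJPY"; · subst h7; decide
  by_cases h8 : s = "AUDJPY"; · subst h8; decide
  simp [List.contains_eq_mem, pvCls, h1, h2, h3, h4, h5, h6, h7, h8]

theorem pvContains1 (s : String) :
    (["USDJPY", "USDCHF"] : List String).contains s
      = decide (3 ≤ (pvCls s).val ∧ (pvCls s).val < 5) := by
  by_cases h1 : s = "EURUSD"; · subst h1; decide
  by_cases h2 : s = "GBPUSD"; · subst h2; decide
  by_cases h3 : s = "AUDUSD"; · subst h3; decide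
  by_cases h4 : s = "USDJPY"; · subst h4; decide
  by_cases h5 : s = "USDCHF"; · subst h5; decide
  by_cases h6 : s = "EURJPY"; · subst h6; decide
  by_cases h7 : s = "GBPJPY"; · subst h7; decide
  by_cases h8 : s = "AUDJPY"; · subst h8; decide
  simp [List.contains_eq_mem, pvCls, h1, h2, h3, h4, h5, h6, h7, h8]

theorem pvContains2 (s : String) :
    (["EURJPY", "GBPJPY", "AUDJPY"] : List String).contains s
      = decide (5 ≤ (pvCls s).val ∧ (pvCls s).val < 8) := by
  by_cases h1 : s = "EURUSD"; · subst h1; decide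
  by_cases h2 : s = "GBPUSD"; · subst h2; decide
  by_cases h3 : s = "AUDUSD"; · subst h3; decide
  by_cases h4 : s = "USDJPY"; · subst h4; decide
  by_cases h5 : s = "USDCHF"; · subst h5; decide
  by_cases h6 : s = "EURJPY"; · subst h6; decide
  by_cases h7 : s = "GBPJPY"; · subst h7; decide
  by_cases h8 : s = "AUDJPY"; · subst h8; decide
  simp [List.contains_eq_mem, pvCls, h1, h2, h3, h4, h5, h6, h7, h8]

theorem pvGet?_eq (s : String) : pvIndex.get? s = pvGid (pvCls s) := by
  by_cases h1 : s = "EURUSD"; · subst h1; decide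
  by_cases h2 : s = "GBPUSD"; · subst h2; decide
  by_cases h3 : s = "AUDUSD"; · subst h3; decide
  by_cases h4 : s = "USDJPY"; · subst h4; decide
  by_cases h5 : s = "USDCHF"; · subst h5; decide
  by_cases h6 : s = "EURJPY"; · subst h6; decide
  by_cases h7 : s = "GBPJPY"; · subst h7; decide
  by_cases h8 : s = "AUDJPY"; · subst h8; decide
  simp [pvIndex_eq, PySem.Dict.get?, pvCls, pvGid,
    h1, h2, h3, h4, h5, h6, h7, h8,
    Ne.symm h1, Ne.symm h2, Ne.symm h3, Ne.symm h4, Ne.symm h5, Ne.symm h6, Ne.symm h7, Ne.symm h8]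

theorem pvAeqB (s1 s2 : String) :
    are_correlated_pairs_py s1 s2 = are_correlated_pairs_py_alt s1 s2 := by
  simp only [are_correlated_pairs_py, are_correlated_pairs_py_alt, pvGroups, pvScanGroups,
    pvContains0, pvContains1, pvContains2, pvGet?_eq]
  generalize pvCls s1 = x
  generalize pvCls s2 = y
  revert x y
  decide

-- ===== VERDICT (by name: the statement is the Claim_ definition above) =====
theorem are_correlated_pairs_py_spec : Claim_equal_are_correlated_pairs_py := by
  intro s1 s2 _
  exact pvAeqB s1 s2
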